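-- pv_equiv track=rewrite | github.com/robdobsn/BusRaider | Tests/Comms/testSimpleCmd/testBinFileRead.py | genS3Rec
-- ===== SOURCE A (Python) =====
-- def genS3Rec(startCh, addr, data, leng, offset):
--     s3Rec = startCh + "3" + "{:0>2x}".format(leng + 5)
--     csum = leng + 5
--     s3Rec += "{:0>8x}".format(addr)
--     csum += (addr & 0xff) + ((addr >> 8) & 0xff)
--     for byteIdx in range(leng):
--         byteVal = data[byteIdx+offset]
--         s3Rec += "{:0>2x}".format(byteVal)
--         csum += byteVal
--     s3Rec += "{:0>2x}".format((csum & 0xff) ^ 0xff)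
--     return s3Rec
-- ===== SOURCE B (Python) =====
-- def genS3Rec(startCh, addr, data, leng, offset):
--     # Divide-and-conquer: a balanced recursion over the byte index range returns
--     # (hex body, byte sum) for each half and merges them; the record is assembled once.
--     def seg(lo, hi):
--         if hi - lo <= 0:
--             return ("", 0)
--         if hi - lo == 1:
--             b = data[lo + offset]
--             return ("{:0>2x}".format(b), b)
--         mid = (lo + hi) // 2
--         lbody, lsum = seg(lo, mid)
--         rbody, rsum = seg(mid, hi)
--         return (lbody + rbody, lsum + rsum)
--     body, dsum = seg(0, leng)
--     csum = leng + 5 + (addr & 0xff) + ((addr >> 8) & 0xff) + dsum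
--     return (startCh + "3" + "{:0>2x}".format(leng + 5)
--             + "{:0>8x}".format(addr) + body
--             + "{:0>2x}".format((csum & 0xff) ^ 0xff))
-- ===== Notes on version B (the rewrite author's own statement) =====
-- stated objective: alternative
-- what changed: A's single left-to-right loop that threads both the growing record string and the checksum accumulator is replaced by a balanced divide-and-conquer recursion over the byte index range that returns (hex body, byte sum) for each half and merges them, with the record assembled once at the end.
import Mathlib
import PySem

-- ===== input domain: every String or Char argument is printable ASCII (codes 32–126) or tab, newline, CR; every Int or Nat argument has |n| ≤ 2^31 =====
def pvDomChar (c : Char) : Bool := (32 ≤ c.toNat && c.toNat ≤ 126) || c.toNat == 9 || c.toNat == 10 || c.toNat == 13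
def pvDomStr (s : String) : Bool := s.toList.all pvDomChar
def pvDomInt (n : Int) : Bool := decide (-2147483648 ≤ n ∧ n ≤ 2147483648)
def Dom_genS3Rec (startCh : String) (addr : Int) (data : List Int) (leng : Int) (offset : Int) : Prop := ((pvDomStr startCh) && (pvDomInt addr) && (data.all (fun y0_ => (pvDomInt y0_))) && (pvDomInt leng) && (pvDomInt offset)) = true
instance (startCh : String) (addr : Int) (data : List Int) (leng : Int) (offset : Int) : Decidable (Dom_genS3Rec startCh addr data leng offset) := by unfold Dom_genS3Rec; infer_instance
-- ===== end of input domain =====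

-- B replaces A's single left-to-right loop (threading a growing string and a checksum) by a
-- balanced divide-and-conquer recursion over the byte index range that returns (body, sum)
-- per half and merges; objective: alternative decomposition, same cost.

-- shared helper: Python's "{:0>w x}".format(n) — '0'-fill, '>'-align to width w of format(n,'x')
-- (lowercase hex digits, '-' prefix for negatives; padding zeros go BEFORE the sign, exact as
-- CPython's string-align '0>' spec). Used by both ports because both Pythons call format.
def pyHexPad (n : Int) (w : Nat) : List Char :=
  let s := if n < 0 then '-' :: Nat.toDigits 16 n.natAbs else Nat.toDigits 16 n.toNat
  List.replicate (w - s.length) '0' ++ s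

-- ===== PORT A =====
def genS3Rec (startCh : String) (addr : Int) (data : List Int) (leng : Int) (offset : Int) : String :=
  let s0 := startCh.toList ++ ['3'] ++ pyHexPad (leng + 5) 2
  let c0 := leng + 5
  let s1 := s0 ++ pyHexPad addr 8
  let c1 := c0 + PySem.Int.band addr 255 + PySem.Int.band (addr >>> (8:Nat)) 255
  let sc := (PySem.List.pyRange 0 leng 1).foldl
    (fun (acc : List Char × Int) byteIdx =>
      let byteVal := PySem.List.pyGetD data (byteIdx + offset) 0
      (acc.1 ++ pyHexPad byteVal 2, acc.2 + byteVal))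
    (s1, c1)
  String.ofList (sc.1 ++ pyHexPad (PySem.Int.bxor (PySem.Int.band sc.2 255) 255) 2)

-- ===== PORT B =====
-- termination helper for the midpoint split (cited by decreasing_by below)
theorem segB_mid_bounds (lo hi : Int) (h : lo + 2 ≤ hi) :
    lo + 1 ≤ PySem.Int.floordiv (lo + hi) 2 ∧ PySem.Int.floordiv (lo + hi) 2 + 1 ≤ hi := by
  rw [PySem.Int.floordiv_eq_ediv_of_pos (by omega : (0:Int) < 2)]
  omega

-- (body, byte sum) for byte indices lo ≤ i < hi, by balanced halving (B's inner 'seg')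
def segB (data : List Int) (offset : Int) (lo hi : Int) : List Char × Int :=
  if _h0 : hi - lo ≤ 0 then ([], 0)
  else if _h1 : hi - lo = 1 then
    let b := PySem.List.pyGetD data (lo + offset) 0
    (pyHexPad b 2, b)
  else
    let mid := PySem.Int.floordiv (lo + hi) 2
    let l := segB data offset lo mid
    let r := segB data offset mid hi
    (l.1 ++ r.1, l.2 + r.2)
termination_by (hi - lo).toNat
decreasing_by
  · have := segB_mid_bounds lo hi (by omega); omega
  · have := segB_mid_bounds lo hi (by omega); omega

def genS3Rec_alt (startCh : String) (addr : Int) (data : List Int) (leng : Int) (offset : Int) : String :=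
  let bs := segB data offset 0 leng
  let csum := leng + 5 + PySem.Int.band addr 255 + PySem.Int.band (addr >>> (8:Nat)) 255 + bs.2
  String.ofList (startCh.toList ++ ['3'] ++ pyHexPad (leng + 5) 2
    ++ pyHexPad addr 8 ++ bs.1
    ++ pyHexPad (PySem.Int.bxor (PySem.Int.band csum 255) 255) 2)

-- ===== PRECONDITION & SPEC =====
-- Pre_ excludes exactly the inputs where A's data[byteIdx+offset] raises IndexError
-- (indices offset .. offset+leng-1 must all be Python-valid for data when leng > 0).
def Pre_genS3Rec (startCh : String) (addr : Int) (data : List Int) (leng : Int) (offset : Int) : Prop :=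
  leng ≤ 0 ∨ (PySem.Raise.InRange data.length offset ∧ PySem.Raise.InRange data.length (offset + leng - 1))
instance (startCh : String) (addr : Int) (data : List Int) (leng : Int) (offset : Int) : Decidable (Pre_genS3Rec startCh addr data leng offset) := by unfold Pre_genS3Rec; infer_instance

def pvWitness_genS3Rec : String × Int × List Int × Int × Int := ("S", 4660, [1, 2, 3, 4], 2, 1)

def Spec_genS3Rec (startCh : String) (addr : Int) (data : List Int) (leng : Int) (offset : Int) (out : String) : Prop := out = genS3Rec_alt startCh addr data leng offset
instance (startCh : String) (addr : Int) (data : List Int) (leng : Int) (offset : Int) (out : String) : Decidable (Spec_genS3Rec startCh addr data leng offset out) := by unfold Spec_genS3Rec; infer_instance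

-- ===== CLAIM (what is proved, stated in full; the proofs are below) =====
def Claim_equal_genS3Rec : Prop := ∀ (startCh : String) (addr : Int) (data : List Int) (leng : Int) (offset : Int), Dom_genS3Rec startCh addr data leng offset → Pre_genS3Rec startCh addr data leng offset → Spec_genS3Rec startCh addr data leng offset (genS3Rec startCh addr data leng offset)

-- ===== LEMMAS AND PROOFS =====

-- B's divide-and-conquer produces exactly the flattened hex of the index range and its sum.
theorem segB_eq (data : List Int) (offset : Int) : ∀ (lo hi : Int),
    segB data offset lo hi
      = ((((PySem.List.pyRange lo hi 1).map (fun i => PySem.List.pyGetD data (i + offset) 0)).map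
            (fun b => pyHexPad b 2)).flatten,
         ((PySem.List.pyRange lo hi 1).map (fun i => PySem.List.pyGetD data (i + offset) 0)).sum) := by
  intro lo hi
  induction lo, hi using segB.induct data offset with
  | case1 lo hi h0 =>
    rw [segB]
    simp [h0, PySem.List.pyRange_one, show (hi - lo).toNat = 0 by omega]
  | case2 lo hi h0 h1 =>
    rw [segB]
    simp [h1, PySem.List.pyRange_one, List.range_succ]
  | case3 lo hi h0 h1 mid ihl ihr =>
    rw [segB]
    simp only [dif_neg h0, dif_neg h1]
    have hmb := segB_mid_bounds lo hi (by omega)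
    rw [show PySem.Int.floordiv (lo + hi) 2 = mid from rfl, ihl, ihr,
      PySem.List.pyRange_one_append lo mid hi (by omega) (by omega)]
    simp

-- A's loop threading (string, checksum) equals (appending the flattened formatted chunk,
-- adding the chunk sum).
theorem foldl_append_sum (l : List Int) (f : Int → Int) (s : List Char) (c : Int) :
    l.foldl (fun (acc : List Char × Int) i =>
        (acc.1 ++ pyHexPad (f i) 2, acc.2 + f i)) (s, c)
      = (s ++ ((l.map f).map (fun b => pyHexPad b 2)).flatten, c + (l.map f).sum) := by
  induction l generalizing s c with
  | nil => simp
  | cons x xs ih => simp [ih, List.append_assoc, add_assoc]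

theorem genS3Rec_spec : Claim_equal_genS3Rec := by
  intro startCh addr data leng offset _ _
  unfold Spec_genS3Rec genS3Rec genS3Rec_alt
  dsimp only
  rw [foldl_append_sum (PySem.List.pyRange 0 leng 1)
        (fun i => PySem.List.pyGetD data (i + offset) 0), segB_eq]
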